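-- pv_equiv track=rewrite | github.com/ninnroot/aoc2022 | day8/main.py | get_visible_trees_from_line
-- ===== SOURCE A (Python) =====
-- def get_visible_trees_from_line(height, line):
--
--     visible_trees = []
--     for i in line:
--         if i["height"] < height:
--             visible_trees.append(i)
--         if i["height"] >= height:
--             visible_trees.append(i)
--             break
--
--     return visible_trees
-- ===== SOURCE B (Python) =====
-- def get_visible_trees_from_line(height, line):
--     idx = next((i for i, t in enumerate(line) if t["height"] >= height), None)
--     if idx is None:
--         return list(line)
--     return line[:idx + 1]
-- ===== Notes on version B (the rewrite author's own statement) =====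
-- stated objective: simpler
-- what changed: Replaces the incremental append/break accumulation with a find-first-blocker scan followed by a single slice line[:idx+1] (or a copy of the whole line when no tree blocks).
import Mathlib
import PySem

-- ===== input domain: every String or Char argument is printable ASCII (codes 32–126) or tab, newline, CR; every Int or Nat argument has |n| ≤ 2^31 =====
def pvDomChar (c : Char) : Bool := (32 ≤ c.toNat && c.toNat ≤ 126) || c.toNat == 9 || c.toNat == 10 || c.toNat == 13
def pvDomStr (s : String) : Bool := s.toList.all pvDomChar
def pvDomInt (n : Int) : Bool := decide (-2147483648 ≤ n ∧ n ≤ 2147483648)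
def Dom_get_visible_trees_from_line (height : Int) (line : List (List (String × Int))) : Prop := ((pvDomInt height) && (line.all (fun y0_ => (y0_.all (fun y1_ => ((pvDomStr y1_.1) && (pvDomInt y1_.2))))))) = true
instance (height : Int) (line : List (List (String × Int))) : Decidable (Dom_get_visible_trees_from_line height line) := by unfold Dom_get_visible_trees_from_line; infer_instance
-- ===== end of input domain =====

-- B replaces A's append/break accumulation loop by finding the index of the first
-- blocking tree and slicing the line there (objective: simpler).

-- shared port of the dict access i["height"] (first match in the association list;
-- the default 0 is never reached on inputs admitted by Pre_)
def pvHeight (t : List (String × Int)) : Int := (List.lookup "height" t).getD 0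

-- ===== PORT A =====
def pvGoA (height : Int) : List (List (String × Int)) → List (List (String × Int)) → List (List (String × Int))
  | [], acc => acc
  | i :: rest, acc =>
    let acc1 := if pvHeight i < height then acc ++ [i] else acc
    if pvHeight i ≥ height then acc1 ++ [i] else pvGoA height rest acc1

def get_visible_trees_from_line (height : Int) (line : List (List (String × Int))) : List (List (String × Int)) :=
  pvGoA height line []

-- ===== PORT B =====
-- next((i for i, t in enumerate(line) if t["height"] >= height), None)
def pvFindBlock (height : Int) : List (List (String × Int)) → Nat → Option Nat
  | [], _ => none
  | t :: rest, i => if pvHeight t ≥ height then some i else pvFindBlock height rest (i + 1)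

def get_visible_trees_from_line_alt (height : Int) (line : List (List (String × Int))) : List (List (String × Int)) :=
  match pvFindBlock height line 0 with
  | none => line
  | some idx => PySem.List.slice line none (some ((idx + 1 : Nat) : Int))

-- ===== PRECONDITION & SPEC =====
-- Pre_ excludes exactly the inputs on which Python A raises KeyError: some tree that the
-- loop actually reaches (all earlier trees have a "height" entry smaller than height)
-- has no "height" key.
def Pre_get_visible_trees_from_line (height : Int) (line : List (List (String × Int))) : Prop :=
  ∀ i, i < line.length →
    (∀ j, j < i → (List.lookup "height" (line.getD j [])).getD height < height) →
    (List.lookup "height" (line.getD i [])).isSome = true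
instance (height : Int) (line : List (List (String × Int))) : Decidable (Pre_get_visible_trees_from_line height line) := by unfold Pre_get_visible_trees_from_line; infer_instance

def pvWitness_get_visible_trees_from_line : Int × (List (List (String × Int))) :=
  (5, [[("height", 3)], [("height", 7)], [("height", 1)]])

def Spec_get_visible_trees_from_line (height : Int) (line : List (List (String × Int))) (out : List (List (String × Int))) : Prop := out = get_visible_trees_from_line_alt height line
instance (height : Int) (line : List (List (String × Int))) (out : List (List (String × Int))) : Decidable (Spec_get_visible_trees_from_line height line out) := by unfold Spec_get_visible_trees_from_line; infer_instance

-- ===== CLAIM (what is proved, stated in full; the proofs are below) =====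
def Claim_equal_get_visible_trees_from_line : Prop := ∀ (height : Int) (line : List (List (String × Int))), Dom_get_visible_trees_from_line height line → Pre_get_visible_trees_from_line height line → Spec_get_visible_trees_from_line height line (get_visible_trees_from_line height line)

-- ===== LEMMAS AND PROOFS =====

lemma pvFindBlock_shift (height : Int) (l : List (List (String × Int))) (n : Nat) :
    pvFindBlock height l n = (pvFindBlock height l 0).map (· + n) := by
  induction l generalizing n with
  | nil => simp [pvFindBlock]
  | cons t rest ih =>
    by_cases h : pvHeight t ≥ height
    · simp [pvFindBlock, h]
    · simp only [pvFindBlock, if_neg h]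
      rw [ih (n + 1), ih 1]
      cases pvFindBlock height rest 0 <;> simp <;> omega

lemma pvGoA_eq_alt (height : Int) (l acc : List (List (String × Int))) :
    pvGoA height l acc = acc ++ get_visible_trees_from_line_alt height l := by
  induction l generalizing acc with
  | nil => simp [pvGoA, get_visible_trees_from_line_alt, pvFindBlock]
  | cons i rest ih =>
    by_cases h : pvHeight i ≥ height
    · have hlt : ¬ pvHeight i < height := by omega
      simp only [pvGoA, if_neg hlt, if_pos h]
      unfold get_visible_trees_from_line_alt
      simp only [pvFindBlock, if_pos h]
      have : PySem.List.slice (i :: rest) none (some ((0 + 1 : Nat) : Int)) = [i] := by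
        rw [PySem.List.slice_to_natCast]; rfl
      rw [this]
    · have hlt : pvHeight i < height := by omega
      simp only [pvGoA, if_pos hlt, if_neg h]
      rw [ih]
      unfold get_visible_trees_from_line_alt
      simp only [pvFindBlock, if_neg h]
      rw [pvFindBlock_shift height rest 1]
      cases hfb : pvFindBlock height rest 0 with
      | none => simp
      | some k =>
        simp only [Option.map_some]
        rw [PySem.List.slice_to_natCast, PySem.List.slice_to_natCast]
        simp [List.take_succ_cons]

-- ===== VERDICT (by name: the statement is the Claim_ definition above) =====
theorem get_visible_trees_from_line_spec : Claim_equal_get_visible_trees_from_line := by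
  intro height line _ _
  unfold Spec_get_visible_trees_from_line get_visible_trees_from_line
  rw [pvGoA_eq_alt]
  simp
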